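-- pv_equiv track=rewrite | github.com/kirillbk/Advent-of-code | 2023/14/solution.py | part1
-- ===== SOURCE A (Python) =====
-- def part1(platform: list[str]) -> int:
--     answer = 0
--     for x in range(len(platform[0])):
--         i = None
--         for y in range(len(platform)):
--             match platform[y][x]:
--                 case '.':
--                     if i is None:
--                         i = y
--                 case '#':
--                     i = None
--                 case 'O':
--                     if i is None:
--                         answer += len(platform) - y
--                     else:
--                         answer += len(platform) - i
--                         i += 1
--
--     return answer
-- ===== SOURCE B (Python) =====
-- def part1(platform: list[str]) -> int:
--     rows = len(platform)
--     total = 0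
--     for x in range(len(platform[0])):
--         col = ''.join(row[x] for row in platform)
--         start = 0
--         for seg in col.split('#'):
--             d = seg.find('.')
--             head = seg if d == -1 else seg[:d]
--             for j, c in enumerate(head):
--                 if c == 'O':
--                     total += rows - (start + j)
--             if d != -1:
--                 k = seg[d:].count('O')
--                 anchor = start + d
--                 total += k * rows - k * anchor - k * (k - 1) // 2
--             start += len(seg) + 1
--     return total
-- ===== Notes on version B (the rewrite author's own statement) =====
-- stated objective: alternative
-- what changed: A runs a per-cell state machine down each column (an Optional anchor updated at every character); B splits each column into '#'-separated segments and computes each segment's load directly: a scan of the part before the first '.' plus a closed-form arithmetic-series formula k*rows - k*anchor - k*(k-1)//2 for the packed rocks after it.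
import Mathlib
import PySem

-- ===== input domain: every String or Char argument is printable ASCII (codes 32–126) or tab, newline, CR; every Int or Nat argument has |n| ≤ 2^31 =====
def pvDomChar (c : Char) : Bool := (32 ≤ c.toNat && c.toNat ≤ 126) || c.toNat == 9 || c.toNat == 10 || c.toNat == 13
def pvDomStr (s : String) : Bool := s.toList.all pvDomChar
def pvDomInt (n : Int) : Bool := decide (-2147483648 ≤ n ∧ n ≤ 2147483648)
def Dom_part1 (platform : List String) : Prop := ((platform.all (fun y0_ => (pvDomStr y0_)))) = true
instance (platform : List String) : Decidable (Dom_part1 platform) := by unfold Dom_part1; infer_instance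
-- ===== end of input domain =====

-- B replaces A's per-cell Optional-anchor state machine by a per-segment pass ('#'-split columns,
-- closed-form arithmetic-series load for the packed rocks after the first '.'); same cost, different decomposition.


-- ===== PORT A =====
-- platform[y][x], total form: Python raises IndexError exactly where a pyGet? is none; those inputs are excluded by Pre_part1
def pvChar (platform : List String) (y x : Int) : Char :=
  (PySem.List.pyGet? ((PySem.List.pyGet? platform y).getD "").toList x).getD ' '

def part1 (platform : List String) : Int :=
  let R : Int := platform.length
  (PySem.List.pyRange 0 (((PySem.List.pyGet? platform 0).getD "").toList.length : Int) 1).foldl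
    (fun answer x =>
      ((PySem.List.pyRange 0 R 1).foldl
        (fun (st : Int × Option Int) y =>
          match pvChar platform y x with
          | '.' => match st.2 with | none => (st.1, some y) | some _ => st
          | '#' => (st.1, none)
          | 'O' => match st.2 with
                   | none => (st.1 + (R - y), none)
                   | some i => (st.1 + (R - i), some (i + 1))
          | _ => st)
        (answer, none)).1)
    0

-- ===== PORT B =====
-- one '#'-free segment of a column: seg.find('.'), scan of seg[:d], then the closed-form block load
def segLoad (R start : Int) (seg : List Char) : Int :=
  let d : Int := PySem.Chars.find seg ['.']
  let head : List Char := if d = -1 then seg else PySem.List.slice seg none (some d)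
  let t : Int := (PySem.List.enumerate head 0).foldl
      (fun tot jc => if jc.2 = 'O' then tot + (R - (start + jc.1)) else tot) 0
  if d ≠ -1 then
    let k : Int := (PySem.Chars.count (PySem.List.slice seg (some d) none) ['O'] : Nat)
    let anchor : Int := start + d
    t + (k * R - k * anchor - PySem.Int.floordiv (k * (k - 1)) 2)
  else t

def part1_alt (platform : List String) : Int :=
  let rows : Int := platform.length
  (PySem.List.pyRange 0 (((PySem.List.pyGet? platform 0).getD "").toList.length : Int) 1).foldl
    (fun total x =>
      let col : List Char := platform.map (fun row => (PySem.List.pyGet? row.toList x).getD ' ')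
      ((PySem.Chars.splitOn col ['#']).foldl
        (fun (st : Int × Int) seg => (st.1 + segLoad rows st.2 seg, st.2 + (seg.length : Int) + 1))
        (total, 0)).1)
    0

-- ===== PRECONDITION & SPEC =====
-- exactly where Python A returns: platform nonempty (platform[0]) and no row shorter than row 0 (platform[y][x])
def Pre_part1 (platform : List String) : Prop :=
  platform ≠ [] ∧ ∀ s ∈ platform, ((PySem.List.pyGet? platform 0).getD "").toList.length ≤ s.toList.length
instance (platform : List String) : Decidable (Pre_part1 platform) := by unfold Pre_part1; infer_instance
def pvWitness_part1 : List String := ["O.#", ".O.", "#.O"]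

def Spec_part1 (platform : List String) (out : Int) : Prop := out = part1_alt platform
instance (platform : List String) (out : Int) : Decidable (Spec_part1 platform out) := by unfold Spec_part1; infer_instance

-- ===== CLAIM (what is proved, stated in full; the proofs are below) =====
def Claim_equal_part1 : Prop := ∀ (platform : List String), Dom_part1 platform → Pre_part1 platform → Spec_part1 platform (part1 platform)

-- ===== LEMMAS AND PROOFS =====

-- A's per-cell transition, on an (index, char) pair
def stepE (R : Int) (st : Int × Option Int) (p : Int × Char) : Int × Option Int :=
  match p.2 with
  | '.' => match st.2 with | none => (st.1, some p.1) | some _ => st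
  | '#' => (st.1, none)
  | 'O' => match st.2 with
           | none => (st.1 + (R - p.1), none)
           | some i => (st.1 + (R - i), some (i + 1))
  | _ => st


theorem stepE_dot (R : Int) (st : Int × Option Int) (y : Int) :
    stepE R st (y, '.') = match st.2 with | none => (st.1, some y) | some _ => st := rfl
theorem stepE_hash (R : Int) (st : Int × Option Int) (y : Int) :
    stepE R st (y, '#') = (st.1, none) := rfl
theorem stepE_O (R : Int) (st : Int × Option Int) (y : Int) :
    stepE R st (y, 'O') = match st.2 with
      | none => (st.1 + (R - y), none)
      | some i => (st.1 + (R - i), some (i + 1)) := rfl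
theorem stepE_other (R : Int) (st : Int × Option Int) (y : Int) (c : Char)
    (h1 : c ≠ '.') (h2 : c ≠ '#') (h3 : c ≠ 'O') : stepE R st (y, c) = st := by
  simp [stepE]

-- load of the '#'-free, '.'-free prefix of a segment starting at absolute row s
def hsum (R : Int) : Int → List Char → Int
  | _, [] => 0
  | s, c :: tl => (if c = 'O' then R - s else 0) + hsum R (s + 1) tl

-- load of k rocks packed consecutively from anchor a
def oPack (R a : Int) : Nat → Int
  | 0 => 0
  | k + 1 => (R - a) + oPack R (a + 1) k

-- Python str.split('#') as a structural recursion
def mySplit : List Char → List (List Char)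
  | [] => [[]]
  | c :: tl => if c = '#' then [] :: mySplit tl else (mySplit tl).modifyHead (c :: ·)

theorem mySplit_ne_nil (l : List Char) : mySplit l ≠ [] := by
  induction l with
  | nil => simp [mySplit]
  | cons c tl ih =>
    simp only [mySplit]
    split_ifs
    · simp
    · intro h; exact ih (by simpa using List.modifyHead_eq_nil_iff.mp h)

theorem splitOn_go_spec (fuel : Nat) (l cur : List Char) (acc : List (List Char))
    (h : l.length ≤ fuel) :
    PySem.Chars.splitOn.go ['#'] fuel l cur acc
      = acc.reverse ++ (mySplit l).modifyHead (cur.reverse ++ ·) := by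
  induction fuel generalizing l cur acc with
  | zero =>
    have : l = [] := by cases l <;> simp_all
    subst this
    simp [PySem.Chars.splitOn.go, mySplit]
  | succ fuel ih =>
    cases l with
    | nil => simp [PySem.Chars.splitOn.go, mySplit]
    | cons c rest =>
      simp only [PySem.Chars.splitOn.go]
      by_cases hc : c = '#'
      · subst hc
        rw [if_pos (by simp [List.isPrefixOf])]
        rw [ih _ _ _ (by simpa using Nat.le_of_succ_le_succ (by simpa using h))]
        simp [mySplit]
        cases hm : mySplit rest with
        | nil => exact absurd hm (mySplit_ne_nil rest)
        | cons a tl => simp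
      · rw [if_neg (by simp [List.isPrefixOf, Ne.symm hc])]
        rw [ih _ _ _ (by simpa using Nat.le_of_succ_le_succ (by simpa using h))]
        simp only [mySplit, if_neg hc]
        obtain ⟨a, tl, hml⟩ : ∃ a tl, mySplit rest = a :: tl := by
          cases hm : mySplit rest with
          | nil => exact absurd hm (mySplit_ne_nil rest)
          | cons a tl => exact ⟨a, tl, rfl⟩
        simp [hml]

theorem splitOn_eq (col : List Char) : PySem.Chars.splitOn col ['#'] = mySplit col := by
  rw [PySem.Chars.splitOn, splitOn_go_spec _ _ _ _ (by omega)]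
  obtain ⟨a, tl, hml⟩ : ∃ a tl, mySplit col = a :: tl := by
    cases hm : mySplit col with
    | nil => exact absurd hm (mySplit_ne_nil col)
    | cons a tl => exact ⟨a, tl, rfl⟩
  simp [hml]

theorem mySplit_no_hash (l : List Char) (h : '#' ∉ l) : mySplit l = [l] := by
  induction l with
  | nil => rfl
  | cons c tl ih =>
    have hc : ¬ (c = '#') := by rintro rfl; exact h (by simp)
    simp only [mySplit, if_neg hc]
    rw [ih (fun hm => h (by simp [hm]))]
    rfl

theorem mySplit_append_hash (seg rest : List Char) (h : '#' ∉ seg) :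
    mySplit (seg ++ '#' :: rest) = seg :: mySplit rest := by
  induction seg with
  | nil => simp [mySplit]
  | cons c tl ih =>
    have hc : ¬ (c = '#') := by rintro rfl; exact h (by simp)
    simp only [List.cons_append, mySplit, if_neg hc]
    rw [ih (fun hm => h (by simp [hm]))]
    rfl

theorem find_no_dot (l : List Char) (h : '.' ∉ l) : PySem.Chars.find l ['.'] = -1 := by
  rw [PySem.Chars.find_eq_neg_one_iff]
  intro hinf
  exact h (hinf.subset (by simp))

theorem findgo_dot (head : List Char) (k : Nat) (tail : List Char) (h : '.' ∉ head) :
    PySem.Chars.find.go ['.'] (head ++ '.' :: tail) k = (k : Int) + head.length := by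
  induction head generalizing k with
  | nil => simp [PySem.Chars.find.go, List.isPrefixOf]
  | cons c tl ih =>
    have hc : ¬ (c = '.') := by rintro rfl; exact h (by simp)
    simp only [List.cons_append, PySem.Chars.find.go]
    rw [if_neg (by simp [List.isPrefixOf, Ne.symm hc])]
    rw [ih (k + 1) (fun hm => h (by simp [hm]))]
    simp [List.length_cons]; ring

theorem find_prefix_dot (head tail : List Char) (h : '.' ∉ head) :
    PySem.Chars.find (head ++ '.' :: tail) ['.'] = (head.length : Int) := by
  rw [PySem.Chars.find, findgo_dot _ _ _ h]; ring

theorem countgo_spec (fuel : Nat) (l : List Char) (acc : Nat) (h : l.length ≤ fuel) :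
    PySem.Chars.count.go ['O'] fuel l acc = acc + l.count 'O' := by
  induction fuel generalizing l acc with
  | zero =>
    have : l = [] := by cases l <;> simp_all
    subst this; simp [PySem.Chars.count.go]
  | succ fuel ih =>
    cases l with
    | nil => simp [PySem.Chars.count.go]
    | cons c rest =>
      simp only [PySem.Chars.count.go]
      by_cases hc : c = 'O'
      · subst hc
        rw [if_pos (by simp [List.isPrefixOf])]
        rw [ih _ _ (by simpa using Nat.le_of_succ_le_succ (by simpa using h))]
        simp; omega
      · rw [if_neg (by simp [List.isPrefixOf, Ne.symm hc])]
        rw [ih _ _ (by simpa using Nat.le_of_succ_le_succ (by simpa using h))]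
        simp [hc]

theorem count_O (l : List Char) : PySem.Chars.count l ['O'] = l.count 'O' := by
  rw [PySem.Chars.count, if_neg (by simp), countgo_spec _ _ _ (le_refl _)]; omega

theorem floordiv_two_even (m : Int) : PySem.Int.floordiv (2 * m) 2 = m := by
  rw [PySem.Int.floordiv_eq_ediv_of_pos (by norm_num)]
  omega

theorem pack_closed (R a : Int) (k : Nat) :
    oPack R a k = (k : Int) * R - (k : Int) * a - PySem.Int.floordiv ((k : Int) * ((k : Int) - 1)) 2 := by
  induction k generalizing a with
  | zero =>
    have h0 : ((0 : Nat) : Int) * (((0 : Nat) : Int) - 1) = 2 * 0 := by norm_num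
    simp only [oPack, h0, floordiv_two_even]
    norm_num
  | succ k ih =>
    obtain ⟨m, hm⟩ : ∃ m, (k : Int) * ((k : Int) - 1) = 2 * m := by
      rcases Int.even_or_odd (k : Int) with ⟨c, hc⟩ | ⟨c, hc⟩
      · exact ⟨c * ((k : Int) - 1), by rw [hc]; ring⟩
      · exact ⟨(k : Int) * c, by rw [hc]; ring⟩
    have h2 : ((k : Int) + 1) * (((k : Int) + 1) - 1) = 2 * (m + k) := by
      rw [show ((k : Int) + 1) * (((k : Int) + 1) - 1) = (k : Int) * ((k : Int) - 1) + 2 * k by ring, hm]; ring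
    rw [oPack, ih]
    push_cast
    rw [hm, h2, floordiv_two_even, floordiv_two_even]
    ring

theorem headRun (R : Int) (l : List Char) (h1 : '#' ∉ l) (h2 : '.' ∉ l) (s t : Int) :
    (PySem.List.enumerate l s).foldl (stepE R) (t, none) = (t + hsum R s l, none) := by
  induction l generalizing s t with
  | nil => simp [hsum]
  | cons c tl ih =>
    have hc1 : c ≠ '.' := by rintro rfl; exact h2 (by simp)
    have hc2 : c ≠ '#' := by rintro rfl; exact h1 (by simp)
    rw [PySem.List.enumerate_cons, List.foldl_cons]
    by_cases hO : c = 'O'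
    · subst hO
      rw [stepE_O]
      simp only []
      rw [ih (fun hm => h1 (by simp [hm])) (fun hm => h2 (by simp [hm]))]
      simp [hsum]; ring
    · rw [stepE_other R _ _ _ hc1 hc2 hO]
      rw [ih (fun hm => h1 (by simp [hm])) (fun hm => h2 (by simp [hm]))]
      simp [hsum, hO]

theorem packRun (R : Int) (l : List Char) (h : '#' ∉ l) (s t a : Int) :
    (PySem.List.enumerate l s).foldl (stepE R) (t, some a)
      = (t + oPack R a (l.count 'O'), some (a + l.count 'O')) := by
  induction l generalizing s t a with
  | nil => simp [oPack]
  | cons c tl ih =>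
    have hc2 : c ≠ '#' := by rintro rfl; exact h (by simp)
    have ih' := ih (fun hm => h (by simp [hm]))
    rw [PySem.List.enumerate_cons, List.foldl_cons]
    by_cases hO : c = 'O'
    · subst hO
      rw [stepE_O]
      simp only []
      rw [ih']
      have ho : ∀ k, oPack R a (k + 1) = (R - a) + oPack R (a + 1) k := fun _ => rfl
      simp only [List.count_cons_self, ho, Prod.mk.injEq]
      constructor
      · ring
      · push_cast
        ring_nf
    · by_cases hd : c = '.'
      · subst hd
        rw [stepE_dot]
        simp only []
        rw [ih']
        simp
      · rw [stepE_other R _ _ _ hd hc2 hO, ih']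
        simp [hO]

theorem bhead (R start : Int) (l : List Char) (j acc : Int) :
    (PySem.List.enumerate l j).foldl
        (fun tot jc => if jc.2 = 'O' then tot + (R - (start + jc.1)) else tot) acc
      = acc + hsum R (start + j) l := by
  induction l generalizing j acc with
  | nil => simp [hsum]
  | cons c tl ih =>
    rw [PySem.List.enumerate_cons, List.foldl_cons]
    have harg : start + (j + 1) = start + j + 1 := by ring
    have hs : hsum R (start + j) (c :: tl)
        = (if c = 'O' then R - (start + j) else 0) + hsum R (start + j + 1) tl := rfl
    rw [hs]
    by_cases hO : c = 'O'
    · rw [if_pos hO, if_pos hO, ih, harg]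
      ring
    · rw [if_neg hO, if_neg hO, ih, harg]
      ring

theorem exists_dot_split (seg : List Char) (h : '.' ∈ seg) :
    ∃ hd tl, seg = hd ++ '.' :: tl ∧ '.' ∉ hd := by
  refine ⟨seg.takeWhile (fun c => !(c == '.')), (seg.dropWhile (fun c => !(c == '.'))).tail, ?_, ?_⟩
  · have hne : seg.dropWhile (fun c => !(c == '.')) ≠ [] := by
      intro hnil
      have := List.dropWhile_eq_nil_iff.mp hnil _ h
      simp at this
    have hhd := List.head_dropWhile_not (fun c => !(c == '.')) hne
    have hh : (seg.dropWhile (fun c => !(c == '.'))).head hne = '.' := by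
      simpa using hhd
    have h1 : seg.dropWhile (fun c => !(c == '.')) = '.' :: (seg.dropWhile (fun c => !(c == '.'))).tail := by
      conv_lhs => rw [← List.cons_head_tail hne]
      rw [hh]
    conv_lhs => rw [← List.takeWhile_append_dropWhile (p := fun c => !(c == '.')) (l := seg), h1]
  · intro hmem
    have := List.mem_takeWhile_imp hmem
    simp at this

theorem segMain (R : Int) (seg : List Char) (h : '#' ∉ seg) (s t : Int) :
    ((PySem.List.enumerate seg s).foldl (stepE R) (t, none)).1 = t + segLoad R s seg := by
  by_cases hdot : '.' ∈ seg
  · obtain ⟨hd, tl, rfl, hhd⟩ := exists_dot_split seg hdot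
    have hhdH : '#' ∉ hd := fun hm => h (by simp [hm])
    have htlH : '#' ∉ tl := fun hm => h (by simp [hm])
    rw [PySem.List.enumerate_append, List.foldl_append, headRun R hd hhdH hhd,
        PySem.List.enumerate_cons, List.foldl_cons, stepE_dot]
    simp only []
    rw [packRun R tl htlH]
    simp only [segLoad]
    rw [find_prefix_dot hd tl hhd]
    have hne : ((hd.length : Int)) ≠ -1 := by omega
    rw [if_neg hne, if_pos hne]
    rw [PySem.List.slice_to_natCast, PySem.List.slice_from_natCast]
    rw [List.take_left, List.drop_left]
    rw [bhead]
    have hcnt : ('.' :: tl).count 'O' = tl.count 'O' := by simp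
    rw [count_O, hcnt, pack_closed]
    ring_nf
  · rw [headRun R seg h hdot]
    simp only [segLoad]
    rw [find_no_dot seg hdot]
    simp only [if_neg (by simp : ¬ ((-1 : Int) ≠ -1))]
    rw [bhead]
    simp

theorem exists_hash_split (seg : List Char) (h : '#' ∈ seg) :
    ∃ hd tl, seg = hd ++ '#' :: tl ∧ '#' ∉ hd := by
  refine ⟨seg.takeWhile (fun c => !(c == '#')), (seg.dropWhile (fun c => !(c == '#'))).tail, ?_, ?_⟩
  · have hne : seg.dropWhile (fun c => !(c == '#')) ≠ [] := by
      intro hnil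
      have := List.dropWhile_eq_nil_iff.mp hnil _ h
      simp at this
    have hhd := List.head_dropWhile_not (fun c => !(c == '#')) hne
    have hh : (seg.dropWhile (fun c => !(c == '#'))).head hne = '#' := by
      simpa using hhd
    have h1 : seg.dropWhile (fun c => !(c == '#')) = '#' :: (seg.dropWhile (fun c => !(c == '#'))).tail := by
      conv_lhs => rw [← List.cons_head_tail hne]
      rw [hh]
    conv_lhs => rw [← List.takeWhile_append_dropWhile (p := fun c => !(c == '#')) (l := seg), h1]
  · intro hmem
    have := List.mem_takeWhile_imp hmem
    simp at this

theorem colMainAux (R : Int) (n : Nat) : ∀ (col : List Char), col.length ≤ n → ∀ (s t : Int),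
    ((PySem.List.enumerate col s).foldl (stepE R) (t, none)).1
      = ((mySplit col).foldl
          (fun (st : Int × Int) seg => (st.1 + segLoad R st.2 seg, st.2 + (seg.length : Int) + 1))
          (t, s)).1 := by
  induction n with
  | zero =>
    intro col hlen s t
    have : col = [] := by cases col <;> simp_all
    subst this
    have h0 : segLoad R s [] = 0 := rfl
    simp [mySplit, h0]
  | succ n ih =>
    intro col hlen s t
    by_cases hH : '#' ∈ col
    · obtain ⟨seg, rest, rfl, hseg⟩ := exists_hash_split col hH
      rw [PySem.List.enumerate_append, List.foldl_append,
          PySem.List.enumerate_cons, List.foldl_cons, stepE_hash]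
      have hfst : (List.foldl (stepE R) (t, none) (PySem.List.enumerate seg s)).1
          = t + segLoad R s seg := segMain R seg hseg s t
      rw [hfst]
      rw [ih rest (by simp at hlen; omega) (s + (seg.length : Int) + 1) (t + segLoad R s seg)]
      rw [mySplit_append_hash seg rest hseg, List.foldl_cons]
    · rw [mySplit_no_hash col hH, List.foldl_cons]
      simp [segMain R col hH s t]

theorem colMain (R : Int) (col : List Char) (s t : Int) :
    ((PySem.List.enumerate col s).foldl (stepE R) (t, none)).1
      = ((mySplit col).foldl
          (fun (st : Int × Int) seg => (st.1 + segLoad R st.2 seg, st.2 + (seg.length : Int) + 1))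
          (t, s)).1 :=
  colMainAux R col.length col (le_refl _) s t

theorem foldEnum (R : Int) (col : List Char) (s : Int) (init : Int × Option Int) :
    (PySem.List.pyRange s (s + col.length) 1).foldl
        (fun st y => stepE R st (y, (PySem.List.pyGet? col (y - s)).getD ' ')) init
      = (PySem.List.enumerate col s).foldl (stepE R) init := by
  induction col generalizing s init with
  | nil => rw [PySem.List.pyRange_one_eq_nil (by simp)]; simp
  | cons c tl ih =>
    have hlen : s + ((c :: tl).length : Int) = (s + 1) + (tl.length : Int) := by
      simp [List.length_cons]; ring
    rw [hlen, PySem.List.pyRange_one_cons (by omega), List.foldl_cons]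
    have hc0 : (PySem.List.pyGet? (c :: tl) (s - s)).getD ' ' = c := by
      have : s - s = ((0 : Nat) : Int) := by omega
      rw [this, PySem.List.pyGet?_natCast]
      rfl
    rw [hc0]
    have hb : ∀ (st : Int × Option Int), ∀ y ∈ PySem.List.pyRange (s + 1) ((s + 1) + (tl.length : Int)) 1,
        (fun st y => stepE R st (y, (PySem.List.pyGet? (c :: tl) (y - s)).getD ' ')) st y
          = (fun st y => stepE R st (y, (PySem.List.pyGet? tl (y - (s + 1))).getD ' ')) st y := by
      intro st y hy
      rw [PySem.List.mem_pyRange_one] at hy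
      show stepE R st (y, (PySem.List.pyGet? (c :: tl) (y - s)).getD ' ')
        = stepE R st (y, (PySem.List.pyGet? tl (y - (s + 1))).getD ' ')
      obtain ⟨k, hk2⟩ : ∃ k : Nat, y - (s + 1) = (k : Int) := ⟨(y - (s + 1)).toNat, by omega⟩
      have hk : y - s = ((k + 1 : Nat) : Int) := by push_cast; omega
      rw [hk, hk2, PySem.List.pyGet?_natCast, PySem.List.pyGet?_natCast]
      simp
    rw [PySem.List.foldl_congr_mem _ _ _ _ hb]
    exact ih (s + 1) _

theorem perColumn (platform : List String) (x t : Int) :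
    ((PySem.List.pyRange 0 ((platform.length : Nat) : Int) 1).foldl
        (fun (st : Int × Option Int) y =>
          match pvChar platform y x with
          | '.' => match st.2 with | none => (st.1, some y) | some _ => st
          | '#' => (st.1, none)
          | 'O' => match st.2 with
                   | none => (st.1 + (((platform.length : Nat) : Int) - y), none)
                   | some i => (st.1 + (((platform.length : Nat) : Int) - i), some (i + 1))
          | _ => st)
        (t, none)).1
      = ((PySem.Chars.splitOn (platform.map (fun row => (PySem.List.pyGet? row.toList x).getD ' ')) ['#']).foldl
          (fun (st : Int × Int) seg =>
            (st.1 + segLoad ((platform.length : Nat) : Int) st.2 seg, st.2 + (seg.length : Int) + 1))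
          (t, 0)).1 := by
  have h1 : ∀ (st : Int × Option Int), ∀ y ∈ PySem.List.pyRange 0 ((platform.length : Nat) : Int) 1,
      (fun (st : Int × Option Int) y =>
        match pvChar platform y x with
        | '.' => match st.2 with | none => (st.1, some y) | some _ => st
        | '#' => (st.1, none)
        | 'O' => match st.2 with
                 | none => (st.1 + (((platform.length : Nat) : Int) - y), none)
                 | some i => (st.1 + (((platform.length : Nat) : Int) - i), some (i + 1))
        | _ => st) st y
      = (fun (st : Int × Option Int) y => stepE ((platform.length : Nat) : Int) st
          (y, (PySem.List.pyGet? (platform.map (fun row => (PySem.List.pyGet? row.toList x).getD ' ')) (y - 0)).getD ' ')) st y := by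
    intro st y hy
    rw [PySem.List.mem_pyRange_one] at hy
    obtain ⟨k, rfl⟩ : ∃ k : Nat, y = (k : Int) := ⟨y.toNat, by omega⟩
    have hk : k < platform.length := by exact_mod_cast hy.2
    show (match pvChar platform (k : Int) x with
        | '.' => match st.2 with | none => (st.1, some ((k : Nat) : Int)) | some _ => st
        | '#' => (st.1, none)
        | 'O' => match st.2 with
                 | none => (st.1 + (((platform.length : Nat) : Int) - (k : Int)), none)
                 | some i => (st.1 + (((platform.length : Nat) : Int) - i), some (i + 1))
        | _ => st)
      = stepE ((platform.length : Nat) : Int) st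
          ((k : Int), (PySem.List.pyGet? (platform.map (fun row => (PySem.List.pyGet? row.toList x).getD ' ')) ((k : Int) - 0)).getD ' ')
    have hchar : (PySem.List.pyGet? (platform.map (fun row => (PySem.List.pyGet? row.toList x).getD ' ')) ((k : Int) - 0)).getD ' '
        = pvChar platform (k : Int) x := by
      have h0 : ((k : Int) - 0) = ((k : Nat) : Int) := by omega
      rw [h0, PySem.List.pyGet?_natCast]
      simp only [List.getElem?_map]
      rw [List.getElem?_eq_getElem hk]
      simp only [Option.map_some, Option.getD_some]
      unfold pvChar
      rw [PySem.List.pyGet?_natCast, List.getElem?_eq_getElem hk]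
      rfl
    rw [hchar]
    rfl
  rw [PySem.List.foldl_congr_mem _ _ _ _ h1]
  have hb : ((platform.length : Nat) : Int)
      = 0 + ((platform.map (fun row => (PySem.List.pyGet? row.toList x).getD ' ')).length : Int) := by
    simp
  rw [hb, foldEnum, colMain, splitOn_eq]

-- ===== VERDICT (by name: the statement is the Claim_ definition above) =====
theorem part1_spec : Claim_equal_part1 := by
  intro platform _ _
  unfold Spec_part1 part1 part1_alt
  simp only []
  refine PySem.List.foldl_congr_mem _ _ _ _ ?_
  intro acc x _
  exact perColumn platform x acc
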